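-- pv_equiv track=rewrite | github.com/sheenaeb/Change-Point-Detection | src/evaluation/eval_utils.py | match_cpd_with_gtruth
-- ===== SOURCE A (Python) =====
-- def match_cpd_with_gtruth (cpd, gt):
--     '''
--     This function returns tuples of one cpd and one gt which are matched together, it means they are the closest
--     together.
--     '''
--     assert (len (cpd) == len (gt))
--
--     matches = []
--     for i in range (len (cpd)):
--         m1 = []
--         for t_cpd in cpd[i]:
--             best_gt = None
--             for t_gt in gt[i]:
--                 if best_gt is None or abs(t_gt-t_cpd) < min_dist:
--                     min_dist = abs(t_gt-t_cpd)
--                     best_gt = t_gt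
--             m1.append ((t_cpd, best_gt))
--
--         m2 = []
--         for t_gt in gt[i]:
--             best_cpd = None
--             for t_cpd in cpd[i]:
--                 if best_cpd is None or abs(t_gt-t_cpd) < min_dist:
--                     min_dist = abs(t_gt-t_cpd)
--                     best_cpd = t_cpd
--             m2.append ((best_cpd, t_gt))
--
--         m3 = []
--         for m in m1:
--             if m in m2:
--                 m3.append (m)
--         matches.append (m3)
--
--     return matches
-- ===== SOURCE B (Python) =====
-- def match_cpd_with_gtruth(cpd, gt):
--     '''Sort-and-binary-search reformulation: per group, build the sorted distinct
--     values once, find each point's nearest neighbor among the two bracketing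
--     values by binary search (ties broken toward the earlier occurrence, as in
--     the reference), and keep a pair iff the two points are mutually nearest.'''
--     assert (len(cpd) == len(gt))
--
--     def bisect(vals, t, lo, hi):
--         # least index k in [lo, hi] with vals[k] >= t (vals strictly increasing)
--         if lo >= hi:
--             return lo
--         mid = (lo + hi) // 2
--         if vals[mid] < t:
--             return bisect(vals, t, mid + 1, hi)
--         return bisect(vals, t, lo, mid)
--
--     def nearest(xs, vals, t):
--         # first element of xs minimizing abs(x - t); vals = sorted(set(xs)), nonempty
--         k = bisect(vals, t, 0, len(vals))
--         if k == len(vals):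
--             return vals[len(vals) - 1]
--         if k == 0:
--             return vals[0]
--         a, b = vals[k - 1], vals[k]
--         if t - a < b - t:
--             return a
--         if b - t < t - a:
--             return b
--         return a if xs.index(a) < xs.index(b) else b
--
--     matches = []
--     for cs, gs in zip(cpd, gt):
--         if not cs or not gs:
--             matches.append([])
--             continue
--         cvals = sorted(set(cs))
--         gvals = sorted(set(gs))
--         row = []
--         for c in cs:
--             g = nearest(gs, gvals, c)
--             if nearest(cs, cvals, g) == c:
--                 row.append((c, g))
--         matches.append(row)
--     return matches
-- ===== Notes on version B (the rewrite author's own statement) =====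
-- stated objective: faster
-- what changed: B sorts the distinct values of each group once and finds every nearest neighbor by binary search between the two bracketing values (ties resolved by first occurrence), keeping a pair iff the two points are mutually nearest, instead of A's linear nearest scan per point plus the quadratic m1-in-m2 membership filter.
import Mathlib
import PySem

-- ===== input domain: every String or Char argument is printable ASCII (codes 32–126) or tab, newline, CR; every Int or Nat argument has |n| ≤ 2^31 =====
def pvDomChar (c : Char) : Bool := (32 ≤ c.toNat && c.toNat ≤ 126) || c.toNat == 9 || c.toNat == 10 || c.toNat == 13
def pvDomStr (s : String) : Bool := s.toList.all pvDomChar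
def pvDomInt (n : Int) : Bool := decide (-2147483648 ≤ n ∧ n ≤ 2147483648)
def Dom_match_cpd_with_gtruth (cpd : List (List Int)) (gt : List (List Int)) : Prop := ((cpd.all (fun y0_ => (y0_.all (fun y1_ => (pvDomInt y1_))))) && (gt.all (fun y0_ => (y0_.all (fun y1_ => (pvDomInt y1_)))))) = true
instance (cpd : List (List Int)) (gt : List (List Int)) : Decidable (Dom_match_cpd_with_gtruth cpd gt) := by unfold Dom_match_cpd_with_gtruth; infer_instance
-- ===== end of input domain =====

-- B replaces A's per-point linear nearest-neighbor scans and the m1/m2 candidate lists by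
-- sorting the distinct values once per group and bracketing each point by binary search
-- (alternative algorithm; ties broken toward the earlier occurrence, as in A).

-- ===== PORT A =====
-- A's inner nearest scan (best=None / min_dist loop); Python's min_dist is unbound before
-- the first iteration, the fold's 0 is never read because the `none` branch is taken first.
def pvStepA (t : Int) (st : Option Int × Int) (x : Int) : Option Int × Int :=
  match st.1 with
  | none => (some x, |x - t|)
  | some _ => if |x - t| < st.2 then (some x, |x - t|) else st

def pvScanA (ts : List Int) (t : Int) : Option Int × Int :=
  ts.foldl (pvStepA t) (none, 0)

-- the body of A's `for i in range(len(cpd))` loop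
def pvGroupA (csi gsi : List Int) : List (Option Int × Option Int) :=
  let m1 : List (Option Int × Option Int) :=
    csi.foldl (fun m1 c => m1 ++ [((some c : Option Int), (pvScanA gsi c).1)]) []
  let m2 : List (Option Int × Option Int) :=
    gsi.foldl (fun m2 g => m2 ++ [((pvScanA csi g).1, (some g : Option Int))]) []
  m1.foldl (fun m3 m => if m ∈ m2 then m3 ++ [m] else m3) []

def match_cpd_with_gtruth (cpd : List (List Int)) (gt : List (List Int)) : List (List (Option Int × Option Int)) :=
  if cpd.length = gt.length then
    (List.range cpd.length).foldl
      (fun ms i => ms ++ [pvGroupA (cpd.getD i []) (gt.getD i [])]) []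
  else []  -- Python's assert raises here: outside Pre_

-- ===== PORT B =====
-- B's recursive `bisect(vals, t, lo, hi)`: least index k in [lo, hi] with vals[k] >= t.
-- lo, hi are always ≥ 0 in B, so Nat indices and Nat `/ 2` are exact for Python's `(lo+hi)//2`;
-- `vals.getD mid 0` is exact for Python's `vals[mid]` because every call keeps mid < hi ≤ len(vals).
def pvBisect (vals : List Int) (t : Int) (lo hi : Nat) : Nat :=
  if _h : lo < hi then
    let mid := (lo + hi) / 2
    if vals.getD mid 0 < t then pvBisect vals t (mid + 1) hi else pvBisect vals t lo mid
  else lo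
termination_by hi - lo
decreasing_by all_goals omega

-- B's `nearest(xs, vals, t)`; B only calls it with vals = sorted(set(xs)) nonempty, so
-- 0 < k ∨ k < len(vals) and a, b ∈ xs: the getD defaults are never read (Python's
-- `vals[len(vals)-1]`, `vals[0]`, `vals[k-1]`, `vals[k]` and `xs.index` all succeed).
def pvNearestB (xs vals : List Int) (t : Int) : Int :=
  let k := pvBisect vals t 0 vals.length
  if k = vals.length then vals.getD (vals.length - 1) 0
  else if k = 0 then vals.getD 0 0
  else
    let a := vals.getD (k - 1) 0
    let b := vals.getD k 0
    if t - a < b - t then a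
    else if b - t < t - a then b
    else if (PySem.List.index? xs a).getD 0 < (PySem.List.index? xs b).getD 0 then a else b

-- `sorted(set(xs))` (sorted without key over the distinct elements: hash order irrelevant)
def pvSortedVals (xs : List Int) : List Int :=
  PySem.List.sorted (PySem.Set.ofList xs) (fun x => x) false

-- the body of B's `for cs, gs in zip(cpd, gt)` loop
def pvGroupB (cs gs : List Int) : List (Option Int × Option Int) :=
  if cs = [] ∨ gs = [] then []
  else
    let cvals := pvSortedVals cs
    let gvals := pvSortedVals gs
    cs.foldl (fun row c =>
      let g := pvNearestB gs gvals c
      if pvNearestB cs cvals g = c then row ++ [((some c : Option Int), (some g : Option Int))]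
      else row) []

def match_cpd_with_gtruth_alt (cpd : List (List Int)) (gt : List (List Int)) : List (List (Option Int × Option Int)) :=
  (cpd.zip gt).map (fun p => pvGroupB p.1 p.2)

-- ===== PRECONDITION & SPEC =====
-- A's assert raises AssertionError when the two lists have different lengths.
def Pre_match_cpd_with_gtruth (cpd : List (List Int)) (gt : List (List Int)) : Prop :=
  cpd.length = gt.length
instance (cpd : List (List Int)) (gt : List (List Int)) : Decidable (Pre_match_cpd_with_gtruth cpd gt) := by unfold Pre_match_cpd_with_gtruth; infer_instance

def pvWitness_match_cpd_with_gtruth : List (List Int) × List (List Int) := ([[1, 2], [5]], [[2, 7], [4]])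

def Spec_match_cpd_with_gtruth (cpd : List (List Int)) (gt : List (List Int)) (out : List (List (Option Int × Option Int))) : Prop := out = match_cpd_with_gtruth_alt cpd gt
instance (cpd : List (List Int)) (gt : List (List Int)) (out : List (List (Option Int × Option Int))) : Decidable (Spec_match_cpd_with_gtruth cpd gt out) := by unfold Spec_match_cpd_with_gtruth; infer_instance

-- ===== CLAIM (what is proved, stated in full; the proofs are below) =====
def Claim_equal_match_cpd_with_gtruth : Prop := ∀ (cpd : List (List Int)) (gt : List (List Int)), Dom_match_cpd_with_gtruth cpd gt → Pre_match_cpd_with_gtruth cpd gt → Spec_match_cpd_with_gtruth cpd gt (match_cpd_with_gtruth cpd gt)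

-- ===== LEMMAS AND PROOFS =====

-- A's scan, once its best is some b with recorded distance |b - t|, runs min?'s fold
theorem pvScanA_aux (t : Int) : ∀ (ts : List Int) (b : Int),
    (ts.foldl (pvStepA t) ((some b : Option Int), |b - t|)).1
      = PySem.List.min? (b :: ts) (fun x => |x - t|) := by
  intro ts
  induction ts with
  | nil => intro b; rfl
  | cons y ts ih =>
    intro b
    simp only [PySem.List.min?, List.foldl_cons] at ih ⊢
    by_cases h : |y - t| < |b - t| <;> simp [pvStepA, h, ih]

theorem pvScanA_fst (ts : List Int) (t : Int) :
    (pvScanA ts t).1 = PySem.List.min? ts (fun x => |x - t|) := by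
  cases ts with
  | nil => rfl
  | cons x ts =>
    have := pvScanA_aux t ts x
    simpa [pvScanA, PySem.List.min?, pvStepA] using this

-- idxOf? of a member is some of its idxOf
theorem idxOf?_of_mem {xs : List Int} {a : Int} (h : a ∈ xs) :
    List.idxOf? a xs = some (List.idxOf a xs) := by
  induction xs with
  | nil => simp at h
  | cons x t ih =>
    by_cases hx : x = a
    · simp [List.idxOf?_cons, hx]
    · have ht : a ∈ t := by
        rcases List.mem_cons.mp h with h1 | h1
        · exact absurd h1.symm hx
        · exact h1
      simp [List.idxOf?_cons, hx, ih ht]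

-- min?'s fold step, named
def pvMinStep (key : Int → Int) (acc : Option Int) (x : Int) : Option Int :=
  match acc with
  | none => some x
  | some m => if key x < key m then some x else some m

theorem min?_eq_foldl (key : Int → Int) (xs : List Int) :
    PySem.List.min? xs key = xs.foldl (pvMinStep key) none := by
  rw [PySem.List.min?]
  exact PySem.List.foldl_congr_mem xs _ _ none
    (fun acc x _ => by cases acc <;> rfl)

theorem min?_cons_eq (key : Int → Int) (x : Int) (t : List Int) :
    PySem.List.min? (x :: t) key = t.foldl (pvMinStep key) (some x) := by
  rw [min?_eq_foldl, List.foldl_cons]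
  rfl

-- min?'s cons recurrence: the head survives ties
theorem min?_cons_some (key : Int → Int) : ∀ (t : List Int) (x m : Int),
    PySem.List.min? t key = some m →
    PySem.List.min? (x :: t) key = if key m < key x then some m else some x := by
  intro t
  induction t with
  | nil => intro x m hm; simp [PySem.List.min?] at hm
  | cons y t' ih =>
    intro x m hm
    rw [min?_cons_eq]
    have hstep : pvMinStep key (some x) y = if key y < key x then some y else some x := rfl
    rw [List.foldl_cons, hstep]
    by_cases h : key y < key x
    · rw [if_pos h]
      have hl : t'.foldl (pvMinStep key) (some y) = some m := by rw [← min?_cons_eq]; exact hm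
      rw [hl]
      have : key m ≤ key y := PySem.List.min?_isMin hm y (by simp)
      rw [if_pos (lt_of_le_of_lt this h)]
    · rw [if_neg h]
      rw [← min?_cons_eq]
      rcases ht' : PySem.List.min? t' key with _ | m'
      · have ht'nil : t' = [] := (PySem.List.min?_eq_none_iff _ _).mp ht'
        subst ht'nil
        have : m = y := by
          rw [min?_cons_eq] at hm; simpa using hm.symm
        subst this
        rw [if_neg h]
        rfl
      · have hxy := ih x m' ht'
        have hyy := ih y m' ht'
        rw [hm] at hyy
        by_cases h1 : key m' < key y
        · rw [if_pos h1] at hyy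
          have : m' = m := by simpa using hyy.symm
          subst this
          exact hxy
        · rw [if_neg h1] at hyy
          have : y = m := by simpa using hyy.symm
          subst this
          have h2 : ¬ key m' < key x := fun hc => h (lt_of_le_of_lt (le_of_not_gt h1) hc)
          rw [hxy, if_neg h2, if_neg h]

-- uniqueness: the first minimal element IS min?
theorem min?_eq_of (key : Int → Int) : ∀ (xs : List Int) (n : Int),
    n ∈ xs → (∀ y ∈ xs, key n ≤ key y) →
    (∀ y ∈ xs, key y = key n → List.idxOf n xs ≤ List.idxOf y xs) →
    PySem.List.min? xs key = some n := by
  intro xs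
  induction xs with
  | nil => intro n h; simp at h
  | cons x t ih =>
    intro n hmem hmin hfirst
    by_cases hnx : n = x
    · subst hnx
      rcases hm : PySem.List.min? t key with _ | m
      · have : t = [] := (PySem.List.min?_eq_none_iff _ _).mp hm
        subst this; rfl
      · rw [min?_cons_some key t n m hm]
        have : key n ≤ key m := hmin m (List.mem_cons_of_mem _ (PySem.List.min?_mem hm))
        rw [if_neg (not_lt_of_ge this)]
    · have hnt : n ∈ t := by
        rcases List.mem_cons.mp hmem with h1 | h1
        · exact absurd h1 hnx
        · exact h1
      have hkx : key n < key x := by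
        rcases lt_or_eq_of_le (hmin x (by simp)) with h1 | h1
        · exact h1
        · exfalso
          have := hfirst x (by simp) h1.symm
          rw [List.idxOf_cons_self, List.idxOf_cons_ne t (fun he => hnx he.symm)] at this
          omega
      have ihm : PySem.List.min? t key = some n := by
        apply ih n hnt
        · intro y hy; exact hmin y (List.mem_cons_of_mem _ hy)
        · intro y hy hky
          have hyx : y ≠ x := by
            intro he; rw [he] at hky; exact absurd hky (ne_of_lt hkx).symm
          have := hfirst y (List.mem_cons_of_mem _ hy) hky
          rw [List.idxOf_cons_ne t (fun he => hnx he.symm),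
              List.idxOf_cons_ne t (fun he => hyx he.symm)] at this
          omega
      rw [min?_cons_some key t x n ihm, if_pos hkx]

-- the binary search finds the split point of t in a strictly increasing list
theorem pvBisect_spec (vals : List Int) (t : Int)
    (hpw : vals.Pairwise (· < ·)) :
    ∀ (d lo hi : Nat), hi - lo ≤ d → hi ≤ vals.length → lo ≤ hi →
    (∀ i (h : i < vals.length), i < lo → vals[i] < t) →
    (∀ i (h : i < vals.length), hi ≤ i → t ≤ vals[i]) →
    lo ≤ pvBisect vals t lo hi ∧ pvBisect vals t lo hi ≤ hi ∧
    (∀ i (h : i < vals.length), i < pvBisect vals t lo hi → vals[i] < t) ∧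
    (∀ i (h : i < vals.length), pvBisect vals t lo hi ≤ i → t ≤ vals[i]) := by
  have hmono : ∀ i j (hi' : i < vals.length) (hj : j < vals.length), i ≤ j → vals[i] ≤ vals[j] := by
    intro i j hi' hj hij
    rcases Nat.lt_or_ge i j with h | h
    · exact le_of_lt (List.pairwise_iff_getElem.mp hpw i j hi' hj h)
    · have : i = j := le_antisymm hij h
      subst this; exact le_refl _
  intro d
  induction d with
  | zero =>
    intro lo hi hd hlen hlohi hlo hhi
    have : lo = hi := by omega
    subst this
    rw [pvBisect, dif_neg (by omega)]
    exact ⟨le_refl _, le_refl _, hlo, hhi⟩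
  | succ d ih =>
    intro lo hi hd hlen hlohi hlo hhi
    rw [pvBisect]
    by_cases h : lo < hi
    · rw [dif_pos h]
      have hmid : (lo + hi) / 2 < vals.length := by omega
      by_cases hv : vals.getD ((lo + hi) / 2) 0 < t
      · rw [if_pos hv]
        rw [List.getD_eq_getElem vals 0 hmid] at hv
        obtain ⟨h1, h2, h3, h4⟩ := ih ((lo + hi) / 2 + 1) hi (by omega) hlen (by omega)
          (fun i hi' hilt => lt_of_le_of_lt (hmono i ((lo + hi) / 2) hi' hmid (by omega)) hv)
          hhi
        exact ⟨by omega, h2, h3, h4⟩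
      · rw [if_neg hv]
        rw [List.getD_eq_getElem vals 0 hmid] at hv
        obtain ⟨h1, h2, h3, h4⟩ := ih lo ((lo + hi) / 2) (by omega) (by omega) (by omega) hlo
          (fun i hi' hge => le_trans (not_lt.mp hv) (hmono ((lo + hi) / 2) i hmid hi' hge))
        exact ⟨h1, by omega, h3, h4⟩
    · rw [dif_neg h]
      have : lo = hi := by omega
      subst this
      exact ⟨le_refl _, le_refl _, hlo, hhi⟩

-- B's binary-search nearest neighbor IS A's first-minimal linear scan
theorem nearestB_min? (xs : List Int) (hxs : xs ≠ []) (t : Int) :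
    PySem.List.min? xs (fun x => |x - t|) = some (pvNearestB xs (pvSortedVals xs) t) := by
  have hpw : (pvSortedVals xs).Pairwise (· < ·) := PySem.List.sorted_ofList_pairwise_lt xs
  set vals := pvSortedVals xs with hvals
  have hmem : ∀ v, v ∈ vals ↔ v ∈ xs := fun v => by
    rw [hvals, pvSortedVals, PySem.List.mem_sorted, PySem.Set.mem_ofList]
  have hvne : vals ≠ [] := by
    intro h
    cases xs with
    | nil => exact hxs rfl
    | cons x xs' =>
      have : x ∈ vals := (hmem x).mpr (by simp)
      rw [h] at this; simp at this
  have hlen0 : 0 < vals.length := List.length_pos_of_ne_nil hvne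
  have hmono : ∀ i j (hi' : i < vals.length) (hj : j < vals.length), i ≤ j → vals[i] ≤ vals[j] := by
    intro i j hi' hj hij
    rcases Nat.lt_or_ge i j with h | h
    · exact le_of_lt (List.pairwise_iff_getElem.mp hpw i j hi' hj h)
    · have : i = j := le_antisymm hij h
      subst this; exact le_refl _
  obtain ⟨hk0, hkL, hlt, hge⟩ := pvBisect_spec vals t hpw vals.length 0 vals.length
    (by omega) (le_refl _) (by omega)
    (fun i h hi0 => absurd hi0 (Nat.not_lt_zero i))
    (fun i h hL => absurd hL (by omega))
  set k := pvBisect vals t 0 vals.length with hk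
  have hidx : ∀ y ∈ xs, ∃ j, ∃ hj : j < vals.length, vals[j] = y :=
    fun y hy => List.mem_iff_getElem.mp ((hmem y).mpr hy)
  have habs_lt : ∀ y : Int, y < t → |y - t| = t - y := fun y h => by
    rw [abs_of_neg (by omega)]; ring
  have habs_ge : ∀ y : Int, t ≤ y → |y - t| = y - t := fun y h => by
    rw [abs_of_nonneg (by omega)]
  by_cases hklen : k = vals.length
  · -- all values < t : nearest is the largest value
    have hn : pvNearestB xs vals t = vals[vals.length - 1]'(by omega) := by
      rw [pvNearestB, ← hk, if_pos hklen, List.getD_eq_getElem vals 0 (by omega)]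
    rw [hn]
    apply min?_eq_of
    · exact (hmem _).mp (List.getElem_mem _)
    · intro y hy
      obtain ⟨j, hj, hjy⟩ := hidx y hy
      have hylt : y < t := hjy ▸ hlt j hj (by omega)
      have hnlt : vals[vals.length - 1]'(by omega) < t := hlt _ (by omega) (by omega)
      rw [habs_lt _ hylt, habs_lt _ hnlt]
      have : y ≤ vals[vals.length - 1]'(by omega) := hjy ▸ hmono j (vals.length - 1) hj (by omega) (by omega)
      omega
    · intro y hy hkey
      obtain ⟨j, hj, hjy⟩ := hidx y hy
      have hylt : y < t := hjy ▸ hlt j hj (by omega)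
      have hnlt : vals[vals.length - 1]'(by omega) < t := hlt _ (by omega) (by omega)
      rw [habs_lt _ hylt, habs_lt _ hnlt] at hkey
      have : y = vals[vals.length - 1]'(by omega) := by omega
      rw [this]
  · by_cases hkz : k = 0
    · -- all values ≥ t : nearest is the smallest value
      have hn : pvNearestB xs vals t = vals[0]'hlen0 := by
        rw [pvNearestB, ← hk, if_neg hklen, if_pos hkz, List.getD_eq_getElem vals 0 hlen0]
      rw [hn]
      apply min?_eq_of
      · exact (hmem _).mp (List.getElem_mem _)
      · intro y hy
        obtain ⟨j, hj, hjy⟩ := hidx y hy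
        have hyge : t ≤ y := hjy ▸ hge j hj (by omega)
        have hnge : t ≤ vals[0]'hlen0 := hge 0 hlen0 (by omega)
        rw [habs_ge _ hyge, habs_ge _ hnge]
        have : vals[0]'hlen0 ≤ y := hjy ▸ hmono 0 j hlen0 hj (by omega)
        omega
      · intro y hy hkey
        obtain ⟨j, hj, hjy⟩ := hidx y hy
        have hyge : t ≤ y := hjy ▸ hge j hj (by omega)
        have hnge : t ≤ vals[0]'hlen0 := hge 0 hlen0 (by omega)
        rw [habs_ge _ hyge, habs_ge _ hnge] at hkey
        have : y = vals[0]'hlen0 := by omega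
        rw [this]
    · -- a < t ≤ b bracket the target
      have hkpos : 0 < k := by omega
      have hklt : k < vals.length := by omega
      have ha : vals.getD (k - 1) 0 = vals[k - 1]'(by omega) := List.getD_eq_getElem vals 0 (by omega)
      have hb : vals.getD k 0 = vals[k]'hklt := List.getD_eq_getElem vals 0 hklt
      set a := vals[k - 1]'(by omega) with hadef
      set b := vals[k]'hklt with hbdef
      have halt : a < t := hlt (k - 1) (by omega) (by omega)
      have hbge : t ≤ b := hge k hklt (by omega)
      have hax : a ∈ xs := (hmem _).mp (List.getElem_mem _)
      have hbx : b ∈ xs := (hmem _).mp (List.getElem_mem _)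
      have hdich : ∀ y ∈ xs, (y ≤ a ∧ y < t) ∨ (t ≤ y ∧ b ≤ y) := by
        intro y hy
        obtain ⟨j, hj, hjy⟩ := hidx y hy
        rcases Nat.lt_or_ge j k with h | h
        · exact Or.inl ⟨hjy ▸ hmono j (k - 1) hj (by omega) (by omega), hjy ▸ hlt j hj h⟩
        · exact Or.inr ⟨hjy ▸ hge j hj h, hjy ▸ hmono k j hklt hj h⟩
      have hn : pvNearestB xs vals t
          = (if t - a < b - t then a
             else if b - t < t - a then b
             else if (PySem.List.index? xs a).getD 0 < (PySem.List.index? xs b).getD 0 then a else b) := by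
        rw [pvNearestB, ← hk, if_neg hklen, if_neg hkz, ha, hb]
      rw [hn]
      by_cases h1 : t - a < b - t
      · rw [if_pos h1]
        apply min?_eq_of
        · exact hax
        · intro y hy
          rw [habs_lt a halt]
          rcases hdich y hy with ⟨hya, hyt⟩ | ⟨hty, hby⟩
          · rw [habs_lt y hyt]; omega
          · rw [habs_ge y hty]; omega
        · intro y hy hkey
          rw [habs_lt a halt] at hkey
          rcases hdich y hy with ⟨hya, hyt⟩ | ⟨hty, hby⟩
          · rw [habs_lt y hyt] at hkey
            have : y = a := by omega
            rw [this]
          · rw [habs_ge y hty] at hkey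
            omega
      · rw [if_neg h1]
        by_cases h2 : b - t < t - a
        · rw [if_pos h2]
          apply min?_eq_of
          · exact hbx
          · intro y hy
            rw [habs_ge b hbge]
            rcases hdich y hy with ⟨hya, hyt⟩ | ⟨hty, hby⟩
            · rw [habs_lt y hyt]; omega
            · rw [habs_ge y hty]; omega
          · intro y hy hkey
            rw [habs_ge b hbge] at hkey
            rcases hdich y hy with ⟨hya, hyt⟩ | ⟨hty, hby⟩
            · rw [habs_lt y hyt] at hkey; omega
            · rw [habs_ge y hty] at hkey
              have : y = b := by omega
              rw [this]
        · rw [if_neg h2]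
          have hia : (PySem.List.index? xs a).getD 0 = List.idxOf a xs := by
            rw [PySem.List.index?_eq_idxOf?, idxOf?_of_mem hax]; rfl
          have hib : (PySem.List.index? xs b).getD 0 = List.idxOf b xs := by
            rw [PySem.List.index?_eq_idxOf?, idxOf?_of_mem hbx]; rfl
          rw [hia, hib]
          have hminy : ∀ n ∈ [a, b], ∀ y ∈ xs, |n - t| ≤ |y - t| := by
            intro n hn y hy
            have hkn : |n - t| = t - a := by
              rcases List.mem_pair.mp hn with h | h
              · rw [h, habs_lt a halt]
              · rw [h, habs_ge b hbge]; omega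
            rw [hkn]
            rcases hdich y hy with ⟨hya, hyt⟩ | ⟨hty, hby⟩
            · rw [habs_lt y hyt]; omega
            · rw [habs_ge y hty]; omega
          have hmemab : ∀ y ∈ xs, |y - t| = t - a → y = a ∨ y = b := by
            intro y hy hkey
            rcases hdich y hy with ⟨hya, hyt⟩ | ⟨hty, hby⟩
            · rw [habs_lt y hyt] at hkey; left; omega
            · rw [habs_ge y hty] at hkey; right; omega
          by_cases h3 : List.idxOf a xs < List.idxOf b xs
          · rw [if_pos h3]
            apply min?_eq_of
            · exact hax
            · exact hminy a (by simp)
            · intro y hy hkey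
              rw [habs_lt a halt] at hkey
              rcases hmemab y hy hkey with h | h
              · rw [h]
              · rw [h]; exact le_of_lt h3
          · rw [if_neg h3]
            apply min?_eq_of
            · exact hbx
            · exact hminy b (by simp)
            · intro y hy hkey
              have : |b - t| = t - a := by rw [habs_ge b hbge]; omega
              rw [this] at hkey
              rcases hmemab y hy hkey with h | h
              · rw [h]; exact le_of_not_gt h3
              · rw [h]

-- the per-group bodies agree
theorem group_eq (cs gs : List Int) : pvGroupA cs gs = pvGroupB cs gs := by
  by_cases hcs : cs = []
  · subst hcs; simp [pvGroupA, pvGroupB]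
  by_cases hgs : gs = []
  · subst hgs
    simp only [pvGroupA, pvGroupB, List.foldl_nil, or_true, if_true]
    have hnil : ∀ (l acc : List (Option Int × Option Int)),
        l.foldl (fun m3 m => if m ∈ ([] : List (Option Int × Option Int)) then m3 ++ [m] else m3) acc = acc := by
      intro l
      induction l with
      | nil => intro acc; rfl
      | cons x t ih => intro acc; rw [List.foldl_cons, if_neg (by simp)]; exact ih acc
    exact hnil _ []
  · simp only [pvGroupA, pvGroupB, if_neg (show ¬(cs = [] ∨ gs = []) by simp [hcs, hgs])]
    rw [PySem.List.foldl_append_singleton_eq_map, PySem.List.foldl_append_singleton_eq_map]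
    simp only [List.nil_append]
    rw [List.foldl_map]
    apply PySem.List.foldl_congr_mem
    intro acc c hc
    set g := pvNearestB gs (pvSortedVals gs) c with hgdef
    have hg : (pvScanA gs c).1 = some g := by rw [pvScanA_fst, nearestB_min? gs hgs c]
    have hgmem : g ∈ gs := PySem.List.min?_mem (nearestB_min? gs hgs c)
    have hcg : (pvScanA cs g).1 = some (pvNearestB cs (pvSortedVals cs) g) := by
      rw [pvScanA_fst, nearestB_min? cs hcs g]
    rw [hg]
    have hiff : (((some c : Option Int), (some g : Option Int))
          ∈ gs.map (fun g' => ((pvScanA cs g').1, (some g' : Option Int))))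
        ↔ pvNearestB cs (pvSortedVals cs) g = c := by
      constructor
      · intro hm
        obtain ⟨g', hg'mem, hpair⟩ := List.mem_map.mp hm
        have h2 : g' = g := by
          have := congrArg Prod.snd hpair
          simpa using this
        subst h2
        have h1 : (pvScanA cs g).1 = some c := by
          have := congrArg Prod.fst hpair
          simpa using this
        rw [hcg] at h1
        simpa using h1
      · intro hq
        refine List.mem_map.mpr ⟨g, hgmem, ?_⟩
        rw [hcg, hq]
    by_cases hcond : pvNearestB cs (pvSortedVals cs) g = c
    · rw [if_pos (hiff.mpr hcond), if_pos hcond]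
    · rw [if_neg (fun hm => hcond (hiff.mp hm)), if_neg hcond]

-- A's range/getD loop is the zip map once the lengths agree
theorem range_zip (F : List Int → List Int → List (Option Int × Option Int)) :
    ∀ (cpd gt : List (List Int)), cpd.length = gt.length →
      (List.range cpd.length).map (fun i => F (cpd.getD i []) (gt.getD i []))
        = (cpd.zip gt).map (fun p => F p.1 p.2) := by
  intro cpd
  induction cpd with
  | nil => intro gt h; simp
  | cons c cs ih =>
    intro gt h
    cases gt with
    | nil => simp at h
    | cons g gs =>
      simp only [List.length_cons, List.range_succ_eq_map, List.map_cons, List.map_map,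
        List.zip_cons_cons]
      refine List.cons_eq_cons.mpr ⟨by simp, ?_⟩
      rw [← ih gs (by simpa using h)]
      apply List.map_congr_left
      intro i _
      simp [Function.comp]

-- ===== VERDICT (by name: the statement is the Claim_ definition above) =====
theorem match_cpd_with_gtruth_spec : Claim_equal_match_cpd_with_gtruth := by
  intro cpd gt _ hpre
  have hlen : cpd.length = gt.length := hpre
  unfold Spec_match_cpd_with_gtruth match_cpd_with_gtruth match_cpd_with_gtruth_alt
  rw [if_pos hlen]
  rw [PySem.List.foldl_append_singleton_eq_map]
  simp only [List.nil_append]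
  rw [range_zip _ cpd gt hlen]
  exact List.map_congr_left (fun p _ => group_eq p.1 p.2)
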